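-- pv_equiv track=rewrite | github.com/open-compass/opencompass | opencompass/datasets/phybench/latex_pre_process.py | find_first_unescaped_brace
-- ===== SOURCE A (Python) =====
-- def find_first_unescaped_brace(s: str) -> int:
--     escaped = False
--     for i, c in enumerate(s):
--         if c == '\\' and not escaped:
--             escaped = True
--             continue
--         if c == '{' and not escaped:
--             return i
--         escaped = False
--     return -1
-- ===== SOURCE B (Python) =====
-- def find_first_unescaped_brace(s: str) -> int:
--     # Search for candidate braces with str.find; a brace is escaped iff the
--     # maximal run of backslashes immediately before it has odd length.
--     start = 0
--     while True:
--         i = s.find('{', start)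
--         if i == -1:
--             return -1
--         j = i
--         while j > 0 and s[j - 1] == '\\':
--             j -= 1
--         if (i - j) % 2 == 0:
--             return i
--         start = i + 1
-- ===== Notes on version B (the rewrite author's own statement) =====
-- stated objective: alternative
-- what changed: Instead of A's per-character state machine with an escaped flag, B repeatedly locates the next '{' with str.find and decides whether it is escaped by scanning backwards over the maximal backslash run before it (escaped iff the run length is odd), retrying past escaped braces.
import Mathlib
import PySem

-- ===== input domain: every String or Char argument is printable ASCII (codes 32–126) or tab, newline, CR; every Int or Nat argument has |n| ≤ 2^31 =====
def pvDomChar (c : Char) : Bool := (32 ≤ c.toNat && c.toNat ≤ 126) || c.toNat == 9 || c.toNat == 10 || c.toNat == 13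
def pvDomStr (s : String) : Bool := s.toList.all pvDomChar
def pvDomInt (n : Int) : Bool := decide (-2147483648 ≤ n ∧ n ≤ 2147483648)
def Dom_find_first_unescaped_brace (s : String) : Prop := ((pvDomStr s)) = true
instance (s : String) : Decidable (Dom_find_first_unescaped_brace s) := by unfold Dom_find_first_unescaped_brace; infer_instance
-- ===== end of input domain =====

-- B drops A's per-character escaped-flag state machine: it searches for candidate '{'
-- occurrences (str.find) and accepts one iff the maximal backslash run immediately
-- before it has even length (backward scan); objective: alternative algorithm.

-- ===== PORT A =====
-- A's for-loop over enumerate(s) with the `escaped` flag, as structural recursion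
-- carrying (escaped, current index).
def ffubGoA : List Char → Bool → Int → Int
  | [], _, _ => -1
  | c :: cs, escaped, i =>
    if c = '\\' ∧ escaped = false then ffubGoA cs true (i + 1)
    else if c = '{' ∧ escaped = false then i
    else ffubGoA cs false (i + 1)

def find_first_unescaped_brace (s : String) : Int := ffubGoA s.toList false 0

-- ===== PORT B =====
-- s.find('{', start): scan the suffix l.drop start, carrying the absolute index.
def ffubFind : List Char → Nat → Option Nat
  | [], _ => none
  | c :: cs, i => if c = '{' then some i else ffubFind cs (i + 1)

-- B's inner while loop: `while j > 0 and s[j-1] == '\\': j -= 1`.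
def ffubRunJ (l : List Char) : Nat → Nat
  | 0 => 0
  | j + 1 => if l[j]? = some '\\' then ffubRunJ l j else j + 1

-- bound on the find result, needed by ffubLoopB's termination proof
theorem ffubFind_bound : ∀ (m : List Char) (i0 i : Nat), ffubFind m i0 = some i → i0 ≤ i ∧ i < i0 + m.length := by
  intro m
  induction m with
  | nil => intro i0 i h; simp [ffubFind] at h
  | cons c cs ih =>
    intro i0 i h
    rw [ffubFind] at h
    split at h
    · cases h; simp only [List.length_cons]; omega
    · have := ih (i0 + 1) i h
      simp only [List.length_cons]
      omega

-- B's outer while loop over `start`.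
def ffubLoopB (l : List Char) (start : Nat) : Int :=
  match h : ffubFind (l.drop start) start with
  | none => -1
  | some i =>
    if (i - ffubRunJ l i) % 2 = 0 then (i : Int) else ffubLoopB l (i + 1)
termination_by l.length - start
decreasing_by
  have := ffubFind_bound (l.drop start) start i h
  have hlen : (l.drop start).length = l.length - start := List.length_drop ..
  omega

def find_first_unescaped_brace_alt (s : String) : Int := ffubLoopB s.toList 0

-- ===== PRECONDITION & SPEC =====
def Spec_find_first_unescaped_brace (s : String) (out : Int) : Prop := out = find_first_unescaped_brace_alt s
instance (s : String) (out : Int) : Decidable (Spec_find_first_unescaped_brace s out) := by unfold Spec_find_first_unescaped_brace; infer_instance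

-- ===== CLAIM (what is proved, stated in full; the proofs are below) =====
def Claim_equal_find_first_unescaped_brace : Prop := ∀ (s : String), Dom_find_first_unescaped_brace s → Spec_find_first_unescaped_brace s (find_first_unescaped_brace s)

-- ===== LEMMAS AND PROOFS =====

-- length of the maximal backslash run ending just before index i
def trailRun (l : List Char) (i : Nat) : Nat := ((l.take i).reverse.takeWhile (· = '\\')).length

-- the common specification: first index >= start holding '{' preceded by an even backslash run
def specFrom (l : List Char) (start : Nat) : Int :=
  if h : start < l.length then
    if l[start] = '{' ∧ trailRun l start % 2 = 0 then (start : Int) else specFrom l (start + 1)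
  else -1
termination_by l.length - start

theorem trailRun_le (l : List Char) (i : Nat) : trailRun l i ≤ i := by
  unfold trailRun
  calc ((l.take i).reverse.takeWhile (· = '\\')).length ≤ (l.take i).reverse.length :=
        (List.takeWhile_sublist _).length_le
    _ ≤ i := by simp

theorem trailRun_succ (l : List Char) (i : Nat) (h : i < l.length) :
    trailRun l (i + 1) = if l[i] = '\\' then trailRun l i + 1 else 0 := by
  have hsplit : l.take (i + 1) = l.take i ++ [l[i]] := by
    rw [List.take_add_one, List.getElem?_eq_getElem h]; rfl
  unfold trailRun
  rw [hsplit, List.reverse_append]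
  simp only [List.reverse_singleton, List.singleton_append, List.takeWhile_cons]
  by_cases hb : l[i] = '\\'
  · simp [hb]
  · simp [hb]

theorem ffubRunJ_eq (l : List Char) : ∀ j, j ≤ l.length → ffubRunJ l j = j - trailRun l j := by
  intro j
  induction j with
  | zero => intro _; simp [ffubRunJ, trailRun]
  | succ j ih =>
    intro hj
    have hjl : j < l.length := by omega
    rw [ffubRunJ, trailRun_succ l j hjl, List.getElem?_eq_getElem hjl]
    by_cases hb : l[j] = '\\'
    · rw [if_pos (by simp [hb]), if_pos hb, ih (by omega)]
      have := trailRun_le l j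
      omega
    · rw [if_neg (by simp [hb]), if_neg hb]
      omega

theorem specFrom_stop (l : List Char) (start : Nat) (h : ¬ start < l.length) :
    specFrom l start = -1 := by
  rw [specFrom, dif_neg h]

theorem specFrom_step (l : List Char) (start : Nat) (h : start < l.length) :
    specFrom l start =
      if l[start] = '{' ∧ trailRun l start % 2 = 0 then (start : Int) else specFrom l (start + 1) := by
  rw [specFrom, dif_pos h]

-- ===== A equals the spec =====
theorem A_eq_spec (l : List Char) : ∀ (n start : Nat), l.length - start ≤ n → start ≤ l.length →
    ffubGoA (l.drop start) (decide (trailRun l start % 2 = 1)) (start : Int) = specFrom l start := by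
  intro n
  induction n with
  | zero =>
    intro start hn hle
    have hstop : start = l.length := by omega
    rw [specFrom_stop l start (by omega), List.drop_of_length_le (by omega), ffubGoA]
  | succ n ih =>
    intro start hn hle
    by_cases h : start < l.length
    · have hdrop : l.drop start = l[start] :: l.drop (start + 1) := (List.getElem_cons_drop h).symm
      have hcast : (start : Int) + 1 = ((start + 1 : Nat) : Int) := by push_cast; ring
      rw [hdrop, ffubGoA]
      by_cases hp : trailRun l start % 2 = 0
      · have hdec : decide (trailRun l start % 2 = 1) = false := by simp [hp]
        by_cases hb : l[start] = '\\'
        · have hbrace : ¬ l[start] = '{' := by rw [hb]; decide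
          rw [if_pos ⟨hb, hdec⟩]
          have hrun : trailRun l (start + 1) = trailRun l start + 1 := by
            rw [trailRun_succ l start h, if_pos hb]
          have hstate : (true : Bool) = decide (trailRun l (start + 1) % 2 = 1) := by
            rw [hrun]; simp; omega
          rw [hstate, hcast, ih (start + 1) (by omega) (by omega),
              specFrom_step l start h, if_neg (by simp [hbrace])]
        · have hrun : trailRun l (start + 1) = 0 := by
            rw [trailRun_succ l start h, if_neg hb]
          have hstate : (false : Bool) = decide (trailRun l (start + 1) % 2 = 1) := by
            rw [hrun]; simp
          by_cases ho : l[start] = '{'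
          · rw [if_neg (by simp [hb]), if_pos ⟨ho, hdec⟩, specFrom_step l start h,
                if_pos ⟨ho, hp⟩]
          · rw [if_neg (by simp [hb]), if_neg (by simp [ho]), hstate, hcast,
                ih (start + 1) (by omega) (by omega), specFrom_step l start h,
                if_neg (by simp [ho])]
      · have hp1 : trailRun l start % 2 = 1 := by omega
        have hdec : decide (trailRun l start % 2 = 1) = true := by simp [hp1]
        rw [if_neg (by simp [hdec]), if_neg (by simp [hdec])]
        by_cases hb : l[start] = '\\'
        · have hrun : trailRun l (start + 1) = trailRun l start + 1 := by
            rw [trailRun_succ l start h, if_pos hb]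
          have hstate : (false : Bool) = decide (trailRun l (start + 1) % 2 = 1) := by
            rw [hrun]; simp; omega
          rw [hstate, hcast, ih (start + 1) (by omega) (by omega),
              specFrom_step l start h, if_neg (by simp [hb])]
        · have hrun : trailRun l (start + 1) = 0 := by
            rw [trailRun_succ l start h, if_neg hb]
          have hstate : (false : Bool) = decide (trailRun l (start + 1) % 2 = 1) := by
            rw [hrun]; simp
          rw [hstate, hcast, ih (start + 1) (by omega) (by omega),
              specFrom_step l start h, if_neg (by simp [hp1])]
    · have hstop : start = l.length := by omega
      rw [specFrom_stop l start (by omega), List.drop_of_length_le (by omega), ffubGoA]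

-- ===== B equals the spec =====
theorem ffubFind_none (m : List Char) : ∀ (i0 : Nat), ffubFind m i0 = none →
    ∀ k (hk : k < m.length), m[k] ≠ '{' := by
  induction m with
  | nil => intro i0 _ k hk; simp at hk
  | cons c cs ih =>
    intro i0 h k hk
    rw [ffubFind] at h
    split at h
    · cases h
    · cases k with
      | zero => simpa using ‹¬ c = '{'›
      | succ k => exact ih (i0 + 1) h k (by simpa using hk)

theorem ffubFind_some (m : List Char) : ∀ (i0 i : Nat), ffubFind m i0 = some i →
    i0 ≤ i ∧ ∃ h : i - i0 < m.length, m[i - i0] = '{' ∧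
      ∀ k, i0 ≤ k → k < i → ∀ hk : k - i0 < m.length, m[k - i0] ≠ '{' := by
  induction m with
  | nil => intro i0 i h; simp [ffubFind] at h
  | cons c cs ih =>
    intro i0 i h
    rw [ffubFind] at h
    split at h
    · cases h
      refine ⟨le_refl _, by simp, by simpa using ‹c = '{'›, ?_⟩
      intro k hk1 hk2; omega
    · obtain ⟨h1, h2, h3, h4⟩ := ih (i0 + 1) i h
      refine ⟨by omega, by simp only [List.length_cons]; omega, ?_, ?_⟩
      · have he : i - i0 = (i - (i0 + 1)) + 1 := by omega
        simp only [he, List.getElem_cons_succ]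
        exact h3
      · intro k hk1 hk2 hk3
        by_cases hk0 : k = i0
        · subst hk0; simpa using ‹¬ c = '{'›
        · have he : k - i0 = (k - (i0 + 1)) + 1 := by omega
          simp only [he, List.getElem_cons_succ]
          exact h4 k (by omega) hk2 (by simp only [List.length_cons] at hk3; omega)

theorem specFrom_skip (l : List Char) : ∀ (n start i : Nat), i - start ≤ n → start ≤ i → i ≤ l.length →
    (∀ k, start ≤ k → k < i → ∀ hk : k < l.length, l[k] ≠ '{') →
    specFrom l start = specFrom l i := by
  intro n
  induction n with
  | zero =>
    intro start i hn hsi _ _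
    have : start = i := by omega
    rw [this]
  | succ n ih =>
    intro start i hn hsi hil hno
    by_cases hcase : start = i
    · rw [hcase]
    · have hlt : start < l.length := by omega
      rw [specFrom_step l start hlt,
          if_neg (by simp [hno start (le_refl _) (by omega) hlt])]
      exact ih (start + 1) i (by omega) (by omega) hil
        (fun k hk1 hk2 hk3 => hno k (by omega) hk2 hk3)

theorem B_eq_spec (l : List Char) : ∀ (n start : Nat), l.length - start ≤ n → start ≤ l.length →
    ffubLoopB l start = specFrom l start := by
  intro n
  induction n with
  | zero =>
    intro start hn hle
    have hstop : start = l.length := by omega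
    rw [ffubLoopB]
    have hdrop : l.drop start = [] := List.drop_of_length_le (by omega)
    split
    · rw [specFrom_stop l start (by omega)]
    · next i hsome => rw [hdrop, ffubFind] at hsome; cases hsome
  | succ n ih =>
    intro start hle' hle
    rw [ffubLoopB]
    split
    · next hnone =>
      have hno := ffubFind_none (l.drop start) start hnone
      have hnone' : ∀ k, start ≤ k → k < l.length → ∀ hk : k < l.length, l[k] ≠ '{' := by
        intro k hk1 hk2 hk3
        have hdk : k - start < (l.drop start).length := by simp only [List.length_drop]; omega
        have hE : start + (k - start) = k := by omega
        have := hno (k - start) hdk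
        rw [List.getElem_drop] at this
        simpa [hE] using this
      rw [specFrom_skip l l.length start l.length (by omega) hle (le_refl _)
            (fun k h1 h2 h3 => hnone' k h1 h2 h3),
          specFrom_stop l l.length (by omega)]
    · next i hsome =>
      obtain ⟨h1, h2, h3, h4⟩ := ffubFind_some (l.drop start) start i hsome
      have hlen : (l.drop start).length = l.length - start := List.length_drop ..
      have hil : i < l.length := by omega
      have hbrace : l[i] = '{' := by
        have hE : start + (i - start) = i := by omega
        rw [List.getElem_drop] at h3
        simpa [hE] using h3
      have hno : ∀ k, start ≤ k → k < i → ∀ hk : k < l.length, l[k] ≠ '{' := by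
        intro k hk1 hk2 hk3
        have hE : start + (k - start) = k := by omega
        have := h4 k hk1 hk2 (by omega)
        rw [List.getElem_drop] at this
        simpa [hE] using this
      have hrun : i - ffubRunJ l i = trailRun l i := by
        rw [ffubRunJ_eq l i (by omega)]
        have := trailRun_le l i
        omega
      rw [specFrom_skip l i start i (by omega) h1 (by omega) hno, specFrom_step l i hil, hrun]
      by_cases hp : trailRun l i % 2 = 0
      · rw [if_pos hp, if_pos ⟨hbrace, hp⟩]
      · rw [if_neg hp, if_neg (by simp [hp]), ih (i + 1) (by omega) (by omega)]

-- ===== VERDICT (by name: the statement is the Claim_ definition above) =====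
theorem find_first_unescaped_brace_spec : Claim_equal_find_first_unescaped_brace := by
  intro s _
  unfold Spec_find_first_unescaped_brace find_first_unescaped_brace find_first_unescaped_brace_alt
  have hA := A_eq_spec s.toList s.toList.length 0 (by omega) (by omega)
  have hB := B_eq_spec s.toList s.toList.length 0 (by omega) (by omega)
  simpa [trailRun] using hA.trans hB.symm
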